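-- pv_equiv track=rewrite | github.com/abau171/projecteuler | utils/digit.py | gen
-- ===== SOURCE A (Python) =====
-- def gen(n):
--     if n == 0:
--         yield 0
--     else:
--         while n > 0:
--             digit = n % 10
--             n = n // 10
--             yield digit
-- ===== SOURCE B (Python) =====
-- def gen(n):
--     if n == 0:
--         yield 0
--     elif n > 0:
--         for ch in reversed(str(n)):
--             yield ord(ch) - 48
-- ===== Notes on version B (the rewrite author's own statement) =====
-- stated objective: idiomatic
-- what changed: Replaces the arithmetic modulus/quotient digit-extraction loop with a traversal of the reversed decimal string form of n, converting each character back to a digit.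
import Mathlib
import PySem

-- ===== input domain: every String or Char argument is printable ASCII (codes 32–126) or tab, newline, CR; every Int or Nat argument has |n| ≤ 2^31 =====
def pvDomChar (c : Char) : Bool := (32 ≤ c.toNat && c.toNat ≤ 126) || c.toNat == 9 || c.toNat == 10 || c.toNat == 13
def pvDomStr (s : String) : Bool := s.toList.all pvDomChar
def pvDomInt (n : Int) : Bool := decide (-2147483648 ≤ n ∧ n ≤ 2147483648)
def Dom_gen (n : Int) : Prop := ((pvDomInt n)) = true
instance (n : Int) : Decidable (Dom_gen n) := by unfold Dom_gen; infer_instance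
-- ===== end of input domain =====

-- B replaces A's %10 / //10 extraction loop by a traversal of reversed(str(n)); equivalence of the yielded digit lists is proved for all n.

-- ===== PORT A =====
-- the 'while n > 0: digit = n % 10; n = n // 10; yield digit' loop, step for step
def genWhile (n : Int) : List Int :=
  if _h : n > 0 then
    PySem.Int.mod n 10 :: genWhile (PySem.Int.floordiv n 10)
  else []
termination_by n.toNat
decreasing_by
  have h10 : (0:Int) < 10 := by omega
  rw [PySem.Int.floordiv_eq_ediv_of_pos h10]
  omega

def gen (n : Int) : List Int :=
  if n == 0 then [0] else genWhile n

-- ===== PORT B =====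
-- 'for ch in reversed(str(n)): yield ord(ch) - 48'; reversed(str(n)) is ported as .toList.reverse (exact)
def gen_alt (n : Int) : List Int :=
  if n == 0 then [0]
  else if n > 0 then
    (PySem.Int.toStr n).toList.reverse.map (fun c => (c.toNat : Int) - 48)
  else []

-- ===== PRECONDITION & SPEC =====
def Spec_gen (n : Int) (out : List Int) : Prop := out = gen_alt n
instance (n : Int) (out : List Int) : Decidable (Spec_gen n out) := by unfold Spec_gen; infer_instance

-- ===== CLAIM (what is proved, stated in full; the proofs are below) =====
def Claim_equal_gen : Prop := ∀ (n : Int), Dom_gen n → Spec_gen n (gen n)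

-- ===== LEMMAS AND PROOFS =====

theorem pv_ord_digitChar (d : Nat) (h : d < 10) :
    ((Nat.digitChar d).toNat : Int) - 48 = (d : Int) := by
  interval_cases d <;> decide

theorem genWhile_nonpos (n : Int) (h : ¬ n > 0) : genWhile n = [] := by
  rw [genWhile]; simp [h]

theorem pv_main (m : Nat) (h : 0 < m) :
    genWhile (m : Int) = (Nat.toDigits 10 m).reverse.map (fun c => (c.toNat : Int) - 48) := by
  induction m using Nat.strong_induction_on with
  | _ m ih =>
    rw [genWhile]
    have hm : (m : Int) > 0 := by exact_mod_cast h
    have hmod : PySem.Int.mod (m : Int) 10 = ((m % 10 : Nat) : Int) := by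
      exact_mod_cast PySem.Int.mod_natCast m 10
    have hdiv : PySem.Int.floordiv (m : Int) 10 = ((m / 10 : Nat) : Int) := by
      exact_mod_cast PySem.Int.floordiv_natCast m 10
    simp only [hm, dif_pos, hmod, hdiv]
    by_cases hlt : m < 10
    · rw [Nat.toDigits_of_lt_base hlt]
      rw [genWhile_nonpos _ (by
        have : m / 10 = 0 := Nat.div_eq_of_lt hlt
        simp [this])]
      simp [Nat.mod_eq_of_lt hlt, pv_ord_digitChar m hlt]
    · rw [Nat.toDigits_of_base_le (by omega) (by omega)]
      rw [ih (m / 10) (Nat.div_lt_self h (by omega)) (Nat.div_pos (by omega) (by omega))]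
      simp [pv_ord_digitChar (m % 10) (Nat.mod_lt m (by omega))]

-- ===== VERDICT (by name: the statement is the Claim_ definition above) =====
theorem gen_spec : Claim_equal_gen := by
  intro n _
  unfold Spec_gen gen gen_alt
  by_cases h0 : n = 0
  · simp [h0]
  · simp only [beq_iff_eq, h0, if_false]
    by_cases hp : n > 0
    · simp only [hp, if_pos]
      have hn : n = ((n.toNat : Nat) : Int) := by omega
      rw [PySem.Int.toList_toStr]
      have : PySem.Int.toChars n = Nat.toDigits 10 n.toNat := by
        simp [PySem.Int.toChars, show ¬ n < 0 by omega]
      rw [this]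
      conv_lhs => rw [hn]
      rw [pv_main n.toNat (by omega)]
    · simp [hp, genWhile_nonpos n hp]
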